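-- pv_equiv track=rewrite | github.com/yjyang1990/RealtimeSTT | RealtimeSTT/realtime_text_stabilizer.py | _shared_word_prefix_length
-- ===== SOURCE A (Python) =====
-- def _shared_word_prefix_length(left: str, right: str) -> int:
--     limit = min(len(left), len(right))
--     common = 0
--     while common < limit and left[common] == right[common]:
--         common += 1
--
--     if common == limit:
--         return common
--
--     last_space = left.rfind(" ", 0, common + 1)
--     if last_space < 0:
--         return 0
--     return last_space + 1
-- ===== SOURCE B (Python) =====
-- def _shared_word_prefix_length(left: str, right: str) -> int:
--     limit = min(len(left), len(right))
--     i = 0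
--     last_boundary = 0
--     while i < limit and left[i] == right[i]:
--         if left[i] == " ":
--             last_boundary = i + 1
--         i += 1
--     if i == limit:
--         return i
--     if left[i] == " ":
--         return i + 1
--     return last_boundary
-- ===== Notes on version B (the rewrite author's own statement) =====
-- stated objective: alternative
-- what changed: Single forward pass that records the last word boundary while scanning, replacing A's scan followed by a backward rfind over the matched prefix.
import Mathlib
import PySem

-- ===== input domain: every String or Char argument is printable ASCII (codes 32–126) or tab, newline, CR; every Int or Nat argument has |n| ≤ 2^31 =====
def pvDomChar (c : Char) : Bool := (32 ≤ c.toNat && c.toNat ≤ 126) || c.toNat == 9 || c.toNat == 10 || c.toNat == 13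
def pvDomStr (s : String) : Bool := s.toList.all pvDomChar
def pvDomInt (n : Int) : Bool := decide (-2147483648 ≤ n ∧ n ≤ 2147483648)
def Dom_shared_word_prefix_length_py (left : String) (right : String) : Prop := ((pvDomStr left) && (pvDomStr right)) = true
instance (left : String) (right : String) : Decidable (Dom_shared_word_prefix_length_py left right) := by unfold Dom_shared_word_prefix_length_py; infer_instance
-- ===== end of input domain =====

-- B replaces A's scan-then-backward-rfind with a single forward pass that records
-- the last word boundary while scanning (objective: alternative decomposition).

-- ===== PORT A =====
-- A's while loop: advance common while in range and characters match.
def pvALoop (l r : List Char) (limit : Nat) (common : Nat) : Nat :=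
  if common < limit ∧ l.getD common ' ' = r.getD common ' ' then
    pvALoop l r limit (common + 1)
  else common
termination_by limit - common
decreasing_by omega

-- Python builtin left.rfind(" ", 0, stop): largest index k < stop with l[k] = ' ', else -1.
-- (exact for stop ≤ l.length, which is how A calls it)
def pvRfindSpace (cs : List Char) : Nat → Int
  | 0 => -1
  | k + 1 => if cs[k]? = some ' ' then (k : Int) else pvRfindSpace cs k

def shared_word_prefix_length_py (left : String) (right : String) : Int :=
  let l := left.toList
  let r := right.toList
  let limit := min l.length r.length
  let common := pvALoop l r limit 0
  if common = limit then (common : Int)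
  else
    let last_space := pvRfindSpace l (common + 1)
    if last_space < 0 then 0 else last_space + 1

-- ===== PORT B =====
-- B's single loop: match characters, recording last_boundary at each space seen.
def pvBLoop (l r : List Char) (limit : Nat) (i : Nat) (lastB : Nat) : Int :=
  if i < limit ∧ l.getD i ' ' = r.getD i ' ' then
    pvBLoop l r limit (i + 1) (if l.getD i ' ' = ' ' then i + 1 else lastB)
  else if i = limit then (i : Int)
  else if l.getD i ' ' = ' ' then (i : Int) + 1
  else (lastB : Int)
termination_by limit - i
decreasing_by omega

def shared_word_prefix_length_py_alt (left : String) (right : String) : Int :=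
  let l := left.toList
  let r := right.toList
  pvBLoop l r (min l.length r.length) 0 0

-- ===== PRECONDITION & SPEC =====
def Spec_shared_word_prefix_length_py (left : String) (right : String) (out : Int) : Prop := out = shared_word_prefix_length_py_alt left right
instance (left : String) (right : String) (out : Int) : Decidable (Spec_shared_word_prefix_length_py left right out) := by unfold Spec_shared_word_prefix_length_py; infer_instance

-- ===== CLAIM (what is proved, stated in full; the proofs are below) =====
def Claim_equal_shared_word_prefix_length_py : Prop := ∀ (left : String) (right : String), Dom_shared_word_prefix_length_py left right → Spec_shared_word_prefix_length_py left right (shared_word_prefix_length_py left right)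

-- ===== LEMMAS AND PROOFS =====

lemma pvRfindSpace_ge (cs : List Char) (k : Nat) : -1 ≤ pvRfindSpace cs k := by
  induction k with
  | zero => simp [pvRfindSpace]
  | succ k ih =>
    simp only [pvRfindSpace]
    split <;> omega

lemma pvALoop_ge (l r : List Char) (limit common : Nat) :
    common ≤ pvALoop l r limit common := by
  unfold pvALoop
  split
  · have := pvALoop_ge l r limit (common + 1)
    omega
  · omega
termination_by limit - common
decreasing_by
  rename_i h; omega

lemma pvALoop_le (l r : List Char) (limit common : Nat) (h : common ≤ limit) :
    pvALoop l r limit common ≤ limit := by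
  unfold pvALoop
  split
  · exact pvALoop_le l r limit (common + 1) (by omega)
  · exact h
termination_by limit - common
decreasing_by
  rename_i h'; omega

lemma loop_agree (l r : List Char) (limit : Nat) (hlim : limit ≤ l.length) :
    ∀ (i lastB : Nat), i ≤ limit → (lastB : Int) = pvRfindSpace l i + 1 →
    pvBLoop l r limit i lastB =
      (if pvALoop l r limit i = limit then ((pvALoop l r limit i : Nat) : Int)
       else if pvRfindSpace l (pvALoop l r limit i + 1) < 0 then 0
       else pvRfindSpace l (pvALoop l r limit i + 1) + 1) := by
  intro i lastB hi hinv
  unfold pvBLoop pvALoop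
  by_cases hc : i < limit ∧ l.getD i ' ' = r.getD i ' '
  · rw [if_pos hc, if_pos hc]
    apply loop_agree l r limit hlim (i + 1)
      (if l.getD i ' ' = ' ' then i + 1 else lastB) (by omega)
    have hget : l[i]? = some (l.getD i ' ') := by
      have : i < l.length := by omega
      simp [List.getD, List.getElem?_eq_getElem this]
    by_cases hs : l.getD i ' ' = ' '
    · rw [if_pos hs]
      have h1 : pvRfindSpace l (i + 1) = (i : Int) := by
        simp only [pvRfindSpace, hget, hs, if_true]
      rw [h1]
      push_cast
      ring
    · rw [if_neg hs]
      have h1 : pvRfindSpace l (i + 1) = pvRfindSpace l i := by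
        simp only [pvRfindSpace, hget, Option.some.injEq]
        rw [if_neg hs]
      rw [h1]
      exact hinv
  · rw [if_neg hc, if_neg hc]
    by_cases hend : i = limit
    · simp [hend]
    · have hlt : i < limit := by omega
      have hne : ¬ (i = limit) := hend
      rw [if_neg hne, if_neg hne]
      have hget : l[i]? = some (l.getD i ' ') := by
        have : i < l.length := by omega
        simp [List.getD, List.getElem?_eq_getElem this]
      by_cases hs : l.getD i ' ' = ' '
      · have h1 : pvRfindSpace l (i + 1) = (i : Int) := by
          simp only [pvRfindSpace, hget, hs, if_true]
        rw [if_pos hs, h1]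
        rw [if_neg (by omega)]
      · have hstep : pvRfindSpace l (i + 1) = pvRfindSpace l i := by
          simp only [pvRfindSpace, hget, Option.some.injEq]
          rw [if_neg hs]
        rw [if_neg hs, hstep]
        have hge := pvRfindSpace_ge l i
        by_cases hneg : pvRfindSpace l i < 0
        · rw [if_pos hneg]; omega
        · rw [if_neg hneg]; omega
termination_by i lastB => limit - i
decreasing_by
  rename_i h _ _; omega

-- ===== VERDICT (by name: the statement is the Claim_ definition above) =====
theorem shared_word_prefix_length_py_spec : Claim_equal_shared_word_prefix_length_py := by
  intro left right _
  unfold Spec_shared_word_prefix_length_py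
  unfold shared_word_prefix_length_py shared_word_prefix_length_py_alt
  simp only
  rw [loop_agree left.toList right.toList (min left.toList.length right.toList.length)
    (by omega) 0 0 (by omega) (by simp [pvRfindSpace])]
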